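-- pv_equiv track=rewrite | github.com/delucagennaro88/mapfolder | person_manager.py | define_dates
-- ===== SOURCE A (Python) =====
-- def define_dates(actor_identifier):
--     birth = ""
--     death = ""
--
--     for key, value in actor_identifier.items():
--         if key == "birth date":
--             birth = actor_identifier['birth date'][:4]
--         elif key == "death date":
--             death = actor_identifier['death date'][:4]
--         else:
--             pass
--
--     if birth and death:
--         dates = '(' + str(birth) + '-' + str(death) + ')'
--
--     elif not birth:
--         dates = '(' + '-' + str(death) + ')'
--
--     elif not death:
--         dates = '(' + str(birth) + '-' + ')'
--
--     else:
--         dates = "(-)"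
--
--     return dates
-- ===== SOURCE B (Python) =====
-- def define_dates(actor_identifier):
--     birth = actor_identifier.get('birth date', '')[:4]
--     death = actor_identifier.get('death date', '')[:4]
--     return '(' + birth + '-' + death + ')'
-- ===== Notes on version B (the rewrite author's own statement) =====
-- stated objective: simpler
-- what changed: Replaces the items() scan plus the four-way if/elif cascade with two direct .get lookups and one closed-form string expression; the empty-string defaults make the single expression reproduce all four branches exactly.
import Mathlib
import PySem

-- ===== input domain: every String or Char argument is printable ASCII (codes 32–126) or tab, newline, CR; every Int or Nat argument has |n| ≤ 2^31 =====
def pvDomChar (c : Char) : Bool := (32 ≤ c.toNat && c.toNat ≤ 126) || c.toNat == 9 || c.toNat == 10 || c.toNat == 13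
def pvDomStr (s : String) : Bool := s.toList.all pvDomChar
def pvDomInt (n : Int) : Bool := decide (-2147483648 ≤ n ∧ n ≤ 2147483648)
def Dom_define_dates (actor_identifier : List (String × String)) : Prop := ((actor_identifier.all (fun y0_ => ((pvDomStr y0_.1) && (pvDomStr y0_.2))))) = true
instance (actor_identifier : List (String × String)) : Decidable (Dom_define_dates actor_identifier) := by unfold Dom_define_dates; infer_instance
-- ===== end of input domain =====

-- B replaces A's items() scan and four-way branch cascade by two direct lookups and one
-- closed-form string expression (objective: simpler).

-- ===== PORT A =====
-- first-match lookup of a key in the dict (= actor_identifier['birth date'] / ['death date'])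
def pvLookup (d : List (String × String)) (k : String) : String :=
  ((PySem.Dict.mk d).get? k).getD ""

def define_dates (actor_identifier : List (String × String)) : String :=
  -- for key, value in actor_identifier.items(): …
  let st := actor_identifier.foldl
    (fun (bd : String × String) kv =>
      if kv.1 == "birth date" then
        (PySem.Str.slice (pvLookup actor_identifier "birth date") none (some 4), bd.2)
      else if kv.1 == "death date" then
        (bd.1, PySem.Str.slice (pvLookup actor_identifier "death date") none (some 4))
      else bd)
    ("", "")
  let birth := st.1
  let death := st.2
  if birth ≠ "" ∧ death ≠ "" then "(" ++ birth ++ "-" ++ death ++ ")"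
  else if birth = "" then "(" ++ "-" ++ death ++ ")"
  else if death = "" then "(" ++ birth ++ "-" ++ ")"
  else "(-)"

-- ===== PORT B =====
def define_dates_alt (actor_identifier : List (String × String)) : String :=
  let birth := PySem.Str.slice (((PySem.Dict.mk actor_identifier).get? "birth date").getD "") none (some 4)
  let death := PySem.Str.slice (((PySem.Dict.mk actor_identifier).get? "death date").getD "") none (some 4)
  "(" ++ birth ++ "-" ++ death ++ ")"

-- ===== PRECONDITION & SPEC =====
def Spec_define_dates (actor_identifier : List (String × String)) (out : String) : Prop := out = define_dates_alt actor_identifier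
instance (actor_identifier : List (String × String)) (out : String) : Decidable (Spec_define_dates actor_identifier out) := by unfold Spec_define_dates; infer_instance

-- ===== CLAIM (what is proved, stated in full; the proofs are below) =====
def Claim_equal_define_dates : Prop := ∀ (actor_identifier : List (String × String)), Dom_define_dates actor_identifier → Spec_define_dates actor_identifier (define_dates actor_identifier)

-- ===== LEMMAS AND PROOFS =====

-- the loop's final state: birth/death are "" unless the key occurs, else the sliced lookup
theorem pv_fold_char (d l : List (String × String)) (b0 d0 : String) :
    l.foldl
      (fun (bd : String × String) kv =>
        if kv.1 == "birth date" then
          (PySem.Str.slice (pvLookup d "birth date") none (some 4), bd.2)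
        else if kv.1 == "death date" then
          (bd.1, PySem.Str.slice (pvLookup d "death date") none (some 4))
        else bd)
      (b0, d0)
    = ((if l.any (fun kv => kv.1 == "birth date") then
          PySem.Str.slice (pvLookup d "birth date") none (some 4) else b0),
       (if l.any (fun kv => kv.1 == "death date") then
          PySem.Str.slice (pvLookup d "death date") none (some 4) else d0)) := by
  induction l generalizing b0 d0 with
  | nil => simp
  | cons kv rest ih =>
    rw [List.foldl_cons]
    by_cases h1 : (kv.1 == "birth date") = true
    · have hxd : (kv.1 == "death date") = false := by rw [eq_of_beq h1]; rfl
      rw [if_pos h1, ih, List.any_cons, List.any_cons, h1, hxd,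
          Bool.true_or, Bool.false_or, if_pos rfl]
      simp
    · have h1f : (kv.1 == "birth date") = false := by simpa using h1
      rw [if_neg h1]
      by_cases h2 : (kv.1 == "death date") = true
      · rw [if_pos h2, ih, List.any_cons, List.any_cons, h1f, h2,
            Bool.false_or, Bool.true_or, if_pos rfl]
        simp
      · have h2f : (kv.1 == "death date") = false := by simpa using h2
        rw [if_neg h2, ih, List.any_cons, List.any_cons, h1f, h2f,
            Bool.false_or, Bool.false_or]

-- if the key never occurs in the list, the Dict lookup is none
theorem pv_lookup_none (d : List (String × String)) (k : String)
    (h : d.any (fun kv => kv.1 == k) = false) :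
    (PySem.Dict.mk d).get? k = none := by
  induction d with
  | nil => rfl
  | cons kv rest ih =>
    simp only [List.any_cons, Bool.or_eq_false_iff] at h
    rw [PySem.Dict.get?_mk_cons]
    simp [h.1, ih h.2]

theorem pv_slice4_empty : PySem.Str.slice "" none (some 4) = "" := rfl

-- A's four-way cascade collapses to B's closed form for every pair of strings
theorem pv_branch_eq (B D : String) :
    (if B ≠ "" ∧ D ≠ "" then "(" ++ B ++ "-" ++ D ++ ")"
     else if B = "" then "(" ++ "-" ++ D ++ ")"
     else if D = "" then "(" ++ B ++ "-" ++ ")"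
     else "(-)")
    = "(" ++ B ++ "-" ++ D ++ ")" := by
  split_ifs with h1 h2 h3
  · rfl
  · simp [h2]
  · simp [h3]
  · tauto

-- ===== VERDICT (by name: the statement is the Claim_ definition above) =====
theorem define_dates_spec : Claim_equal_define_dates := by
  intro d _hDom
  show define_dates d = define_dates_alt d
  unfold define_dates define_dates_alt
  rw [pv_fold_char d d "" ""]
  have eb : (if (d.any fun kv => kv.1 == "birth date") then
        PySem.Str.slice (pvLookup d "birth date") none (some 4) else "")
      = PySem.Str.slice (((PySem.Dict.mk d).get? "birth date").getD "") none (some 4) := by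
    by_cases hb : (d.any fun kv => kv.1 == "birth date") = true
    · rw [if_pos hb]; rfl
    · rw [if_neg hb, pv_lookup_none d "birth date" (Bool.eq_false_iff.mpr hb)]
      exact pv_slice4_empty.symm
  have ed : (if (d.any fun kv => kv.1 == "death date") then
        PySem.Str.slice (pvLookup d "death date") none (some 4) else "")
      = PySem.Str.slice (((PySem.Dict.mk d).get? "death date").getD "") none (some 4) := by
    by_cases hd : (d.any fun kv => kv.1 == "death date") = true
    · rw [if_pos hd]; rfl
    · rw [if_neg hd, pv_lookup_none d "death date" (Bool.eq_false_iff.mpr hd)]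
      exact pv_slice4_empty.symm
  simp only [eb, ed]
  exact pv_branch_eq _ _
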